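-- pv_equiv track=rewrite | github.com/dgnemre/Prediction-of-Life-Qualities | dataset/extractData.py | convertClassification4
-- ===== SOURCE A (Python) =====
-- def convertClassification4(labels):
--     for i in range(0, len(labels)):
--         if (labels[i] >= 75):
--             labels[i] = 1
--         elif (labels[i] >= 50):
--             labels[i] = 2
--         elif (labels[i] >= 25):
--             labels[i] = 3
--         else:
--             labels[i] = 4
--     return labels
-- ===== SOURCE B (Python) =====
-- def convertClassification4(labels):
--     # Painter's algorithm: start everything at class 4, then three staged
--     # overwrite passes promote elements that clear each ascending threshold.
--     n = len(labels)
--     out = [4] * n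
--     for cls, thr in ((3, 25), (2, 50), (1, 75)):
--         for i in range(n):
--             if labels[i] >= thr:
--                 out[i] = cls
--     labels[:] = out
--     return labels
-- ===== Notes on version B (the rewrite author's own statement) =====
-- stated objective: alternative
-- what changed: Replaces the single-pass if/elif cascade with a painter's algorithm: initialise every class to 4, then three staged overwrite passes (thresholds 25, 50, 75 in ascending order) repaint each element that clears the threshold, finally slice-assigned back.
import Mathlib
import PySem

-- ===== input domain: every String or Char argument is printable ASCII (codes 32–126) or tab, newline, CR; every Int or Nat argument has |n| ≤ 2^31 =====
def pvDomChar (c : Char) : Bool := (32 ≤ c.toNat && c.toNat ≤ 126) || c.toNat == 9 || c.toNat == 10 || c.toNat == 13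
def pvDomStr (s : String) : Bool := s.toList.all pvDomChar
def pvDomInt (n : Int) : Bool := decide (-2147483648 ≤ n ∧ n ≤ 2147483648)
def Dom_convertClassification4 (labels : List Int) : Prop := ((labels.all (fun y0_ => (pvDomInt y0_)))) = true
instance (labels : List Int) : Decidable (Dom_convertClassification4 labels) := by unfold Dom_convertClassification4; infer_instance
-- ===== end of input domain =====

-- B replaces A's one-pass if/elif cascade with a painter's algorithm (init to 4, three staged overwrite passes at thresholds 25/50/75); objective: alternative; return-value equivalence — both mutate the list in place in Python.


-- ===== PORT A =====
-- transliteration of A: indexed loop with the if/elif cascade (return-value equivalence;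
-- A mutates labels in place in Python, B performs the same slice-assignment mutation)
def convertClassification4 (labels : List Int) : List Int :=
  match labels with
  | [] => []
  | x :: xs =>
    (if x ≥ 75 then (1 : Int)
     else if x ≥ 50 then 2
     else if x ≥ 25 then 3
     else 4) :: convertClassification4 xs

-- ===== PORT B =====
-- one overwrite pass of B: out[i] := cls wherever labels[i] >= thr
def pvPass (cls thr : Int) (labels out : List Int) : List Int :=
  (labels.zip out).map (fun p => if p.1 ≥ thr then cls else p.2)

-- B: painter's algorithm — all 4s, then staged overwrite passes at 25, 50, 75
def convertClassification4_alt (labels : List Int) : List Int :=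
  [((3 : Int), (25 : Int)), (2, 50), (1, 75)].foldl
    (fun out p => pvPass p.1 p.2 labels out)
    (labels.map (fun _ => (4 : Int)))

-- ===== PRECONDITION & SPEC =====
def Spec_convertClassification4 (labels : List Int) (out : List Int) : Prop := out = convertClassification4_alt labels
instance (labels : List Int) (out : List Int) : Decidable (Spec_convertClassification4 labels out) := by unfold Spec_convertClassification4; infer_instance

-- ===== CLAIM (what is proved, stated in full; the proofs are below) =====
def Claim_equal_convertClassification4 : Prop := ∀ (labels : List Int), Dom_convertClassification4 labels → Spec_convertClassification4 labels (convertClassification4 labels)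

-- ===== LEMMAS AND PROOFS =====

-- one pass over a pointwise map is again a pointwise map
theorem pvPass_map (cls thr : Int) (f : Int → Int) (labels : List Int) :
    pvPass cls thr labels (labels.map f)
      = labels.map (fun x => if x ≥ thr then cls else f x) := by
  induction labels with
  | nil => rfl
  | cons x xs ih => simp [pvPass, List.map_cons] at ih ⊢; exact ih

-- ===== VERDICT (by name: the statement is the Claim_ definition above) =====
theorem convertClassification4_spec : Claim_equal_convertClassification4 := by
  intro labels hdom
  clear hdom
  unfold Spec_convertClassification4
  show convertClassification4 labels
      = [((3 : Int), (25 : Int)), (2, 50), (1, 75)].foldl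
          (fun out p => pvPass p.1 p.2 labels out) (labels.map (fun _ => (4 : Int)))
  simp only [List.foldl_cons, List.foldl_nil, pvPass_map]
  induction labels with
  | nil => rfl
  | cons x xs ih =>
    simp only [convertClassification4, List.map_cons]
    rw [ih]
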